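-- pv_equiv track=rewrite | github.com/JeongGod/Algo-study | leehyowonzero/9week/42890.py | CheckMinimality
-- ===== SOURCE A (Python) =====
-- def CheckMinimality(candi):
--     ret = 0
--     for i in range(len(candi)):
--         flag = True
--         for j in range(len(candi)):
--             if(i == j):
--                 continue
--             if(set(candi[i]) & set(candi[j]) == set(candi[j])):
--                 flag = False
--                 break
--         if(flag):
--             ret += 1
--     return ret
-- ===== SOURCE B (Python) =====
-- def CheckMinimality(candi):
--     # Precompute sets and scan candidates in ascending size order, stopping
--     # as soon as candidates are too large to be subsets.
--     sets = [set(c) for c in candi]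
--     order = sorted(range(len(candi)), key=lambda j: len(sets[j]))
--     ret = 0
--     for i in range(len(candi)):
--         si = sets[i]
--         ok = True
--         for j in order:
--             if len(sets[j]) > len(si):
--                 break
--             if j != i and sets[j] <= si:
--                 ok = False
--                 break
--         if ok:
--             ret += 1
--     return ret
-- ===== Notes on version B (the rewrite author's own statement) =====
-- stated objective: faster
-- what changed: B precomputes each row's set once and scans candidate subsets in ascending size order built by one sort, breaking out as soon as candidates are larger than the current set, instead of A's all-pairs rescan that rebuilds both sets for every (i,j) pair.
import Mathlib
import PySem

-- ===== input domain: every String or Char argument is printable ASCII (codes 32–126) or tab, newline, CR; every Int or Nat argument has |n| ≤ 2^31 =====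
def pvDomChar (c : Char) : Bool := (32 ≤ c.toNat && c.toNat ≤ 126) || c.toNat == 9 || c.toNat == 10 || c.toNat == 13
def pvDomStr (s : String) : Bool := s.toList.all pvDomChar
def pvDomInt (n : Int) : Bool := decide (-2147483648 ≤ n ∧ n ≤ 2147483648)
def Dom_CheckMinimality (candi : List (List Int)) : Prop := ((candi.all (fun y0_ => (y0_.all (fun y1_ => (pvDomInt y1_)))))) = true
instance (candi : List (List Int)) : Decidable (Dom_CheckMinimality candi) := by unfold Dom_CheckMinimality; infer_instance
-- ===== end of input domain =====

-- B changes the algorithm: sets are precomputed once and candidates are scanned in ascending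
-- size order with an early break once candidates are too large to be subsets (objective: faster).

-- ===== PORT A =====
-- Inner loop of A over j (with break on the first subset found); indices are always in range,
-- so candi[i] is ported as candi.getD i [].
def pvInnerA (candi : List (List Int)) (i : Nat) : List Nat → Bool
  | [] => true
  | j :: rest =>
    if i = j then pvInnerA candi i rest
    else if PySem.Set.equal
        (PySem.Set.inter (PySem.Set.ofList (candi.getD i [])) (PySem.Set.ofList (candi.getD j [])))
        (PySem.Set.ofList (candi.getD j [])) then false
    else pvInnerA candi i rest

def CheckMinimality (candi : List (List Int)) : Int :=
  (List.range candi.length).foldl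
    (fun ret i => if pvInnerA candi i (List.range candi.length) then ret + 1 else ret) 0

-- ===== PORT B =====
-- Inner loop of B over the size-sorted index list, breaking once candidate sets get larger than si.
def pvScanB (sets : List (PySem.Set Int)) (i : Nat) (si : PySem.Set Int) : List Nat → Bool
  | [] => true
  | j :: rest =>
    if (sets.getD j []).length > si.length then true
    else if j ≠ i ∧ PySem.Set.issubset (sets.getD j []) si then false
    else pvScanB sets i si rest

def CheckMinimality_alt (candi : List (List Int)) : Int :=
  let sets := candi.map (fun c => PySem.Set.ofList c)
  let order := PySem.List.sorted (List.range candi.length) (fun j => (sets.getD j []).length) false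
  (List.range candi.length).foldl
    (fun ret i => if pvScanB sets i (sets.getD i []) order then ret + 1 else ret) 0

-- ===== PRECONDITION & SPEC =====
def Spec_CheckMinimality (candi : List (List Int)) (out : Int) : Prop := out = CheckMinimality_alt candi
instance (candi : List (List Int)) (out : Int) : Decidable (Spec_CheckMinimality candi out) := by unfold Spec_CheckMinimality; infer_instance

-- ===== CLAIM (what is proved, stated in full; the proofs are below) =====
def Claim_equal_CheckMinimality : Prop := ∀ (candi : List (List Int)), Dom_CheckMinimality candi → Spec_CheckMinimality candi (CheckMinimality candi)


-- ===== LEMMAS AND PROOFS =====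

-- Python's 'set(a) & set(b) == set(b)' is exactly 'set(b) ⊆ set(a)'.
theorem pvEqualInter_iff (s t : PySem.Set Int) :
    PySem.Set.equal (PySem.Set.inter s t) t = true ↔ ∀ x ∈ t, x ∈ s := by
  rw [PySem.Set.equal_iff]
  constructor
  · intro h x hx
    exact ((PySem.Set.mem_inter _ _ _).mp ((h x).mpr hx)).1
  · intro h x
    rw [PySem.Set.mem_inter]
    exact ⟨fun hh => hh.2, fun hx => ⟨h x hx, hx⟩⟩

theorem pvNodupSubsetLen (sj si : List Int) (hj : sj.Nodup) (h : ∀ x ∈ sj, x ∈ si) :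
    sj.length ≤ si.length := by
  have h1 : sj.toFinset.card = sj.length := List.toFinset_card_of_nodup hj
  have h2 : sj.toFinset ⊆ si.toFinset := by
    intro x hx; rw [List.mem_toFinset] at *; exact h x hx
  have := Finset.card_le_card h2
  have h3 := List.toFinset_card_le si
  omega

-- sets[j] (default []) is set(candi[j] or []) for every j.
theorem pvSetsGetD (candi : List (List Int)) (j : Nat) :
    (candi.map (fun c => PySem.Set.ofList c)).getD j [] = PySem.Set.ofList (candi.getD j []) := by
  by_cases hj : j < candi.length
  · simp [List.getD_eq_getElem?_getD, List.getElem?_map, List.getElem?_eq_getElem hj]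
  · rw [List.getD_eq_getElem?_getD, List.getD_eq_getElem?_getD,
      List.getElem?_eq_none (by simpa using Nat.le_of_not_lt hj),
      List.getElem?_eq_none (by omega)]
    rfl

-- A's inner loop returns true iff no j in the list (other than i) has set(candi[j]) ⊆ set(candi[i]).
theorem pvInnerA_iff (candi : List (List Int)) (i : Nat) (js : List Nat) :
    pvInnerA candi i js = true ↔
      ∀ j ∈ js, j ≠ i →
        ¬ ∀ x ∈ PySem.Set.ofList (candi.getD j []), x ∈ PySem.Set.ofList (candi.getD i []) := by
  induction js with
  | nil => simp [pvInnerA]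
  | cons j rest ih =>
    by_cases hij : i = j
    · simp only [pvInnerA, if_pos hij, ih]
      constructor
      · intro h k hk
        rcases List.mem_cons.mp hk with hk | hk
        · omega
        · exact h k hk
      · intro h k hk; exact h k (by simp [hk])
    · by_cases hsub : PySem.Set.equal
          (PySem.Set.inter (PySem.Set.ofList (candi.getD i [])) (PySem.Set.ofList (candi.getD j [])))
          (PySem.Set.ofList (candi.getD j [])) = true
      · simp only [pvInnerA, if_neg hij, if_pos hsub]
        constructor
        · intro h; exact absurd h (by simp)
        · intro h
          exact absurd ((pvEqualInter_iff _ _).mp hsub)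
            (h j (by simp) (fun hji => hij hji.symm))
      · simp only [pvInnerA, if_neg hij, if_neg hsub, ih]
        constructor
        · intro h k hk hki
          rcases List.mem_cons.mp hk with hk | hk
          · subst hk
            exact fun hall => hsub ((pvEqualInter_iff _ _).mpr hall)
          · exact h k hk hki
        · intro h k hk hki; exact h k (by simp [hk]) hki

-- B's inner loop, over a list on which fun j => len(sets[j]) is non-decreasing, returns true iff
-- no j in the list with len(sets[j]) ≤ len(si) (other than i) is a subset of si.
theorem pvScanB_iff (sets : List (PySem.Set Int)) (i : Nat) (si : PySem.Set Int) (js : List Nat)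
    (hsorted : js.Pairwise (fun a b => (sets.getD a []).length ≤ (sets.getD b []).length)) :
    pvScanB sets i si js = true ↔
      ∀ j ∈ js, (sets.getD j []).length ≤ si.length → j ≠ i →
        ¬ PySem.Set.issubset (sets.getD j []) si = true := by
  induction js with
  | nil => simp [pvScanB]
  | cons j rest ih =>
    rcases List.pairwise_cons.mp hsorted with ⟨hhead, htail⟩
    by_cases hlen : (sets.getD j []).length > si.length
    · simp only [pvScanB, if_pos hlen]
      constructor
      · intro _ k hk hklen
        rcases List.mem_cons.mp hk with hk | hk
        · subst hk; omega
        · have := hhead k hk; omega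
      · intro _; trivial
    · by_cases hbad : j ≠ i ∧ PySem.Set.issubset (sets.getD j []) si = true
      · simp only [pvScanB, if_neg hlen, if_pos hbad]
        constructor
        · intro h; exact absurd h (by simp)
        · intro h
          exact absurd hbad.2 (h j (by simp) (by omega) hbad.1)
      · simp only [pvScanB, if_neg hlen, if_neg hbad, ih htail]
        constructor
        · intro h k hk hklen hki
          rcases List.mem_cons.mp hk with hk | hk
          · subst hk
            intro hs; exact hbad ⟨hki, hs⟩
          · exact h k hk hklen hki
        · intro h k hk hklen hki; exact h k (by simp [hk]) hklen hki

-- For each outer index i, the two guard booleans agree.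
theorem pvGuard_eq (candi : List (List Int)) (i : Nat) :
    pvInnerA candi i (List.range candi.length) =
      pvScanB (candi.map (fun c => PySem.Set.ofList c)) i
        ((candi.map (fun c => PySem.Set.ofList c)).getD i [])
        (PySem.List.sorted (List.range candi.length)
          (fun j => ((candi.map (fun c => PySem.Set.ofList c)).getD j []).length) false) := by
  set sets := candi.map (fun c => PySem.Set.ofList c) with hsets
  set order := PySem.List.sorted (List.range candi.length)
      (fun j => (sets.getD j []).length) false with horder
  have hpair : order.Pairwise (fun a b => (sets.getD a []).length ≤ (sets.getD b []).length) :=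
    PySem.List.sorted_pairwise _ _
  rw [Bool.eq_iff_iff, pvInnerA_iff, pvScanB_iff _ _ _ _ hpair]
  constructor
  · intro h j hj hlen hji
    rw [PySem.Set.issubset_iff]
    have hj' : j ∈ List.range candi.length := (PySem.List.mem_sorted _ _ _ _).mp hj
    have := h j hj' hji
    rw [hsets, pvSetsGetD, pvSetsGetD]
    exact this
  · intro h j hj hji hall
    have hall' : ∀ x ∈ sets.getD j [], x ∈ sets.getD i [] := by
      rw [hsets, pvSetsGetD, pvSetsGetD]; exact hall
    have hlen : (sets.getD j []).length ≤ (sets.getD i []).length :=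
      pvNodupSubsetLen _ _ (by rw [hsets, pvSetsGetD]; exact PySem.Set.nodup_ofList _) hall'
    have hj' : j ∈ order := (PySem.List.mem_sorted _ _ _ _).mpr hj
    exact h j hj' hlen hji ((PySem.Set.issubset_iff _ _).mpr hall')

-- ===== VERDICT (by name: the statement is the Claim_ definition above) =====
theorem CheckMinimality_spec : Claim_equal_CheckMinimality := by
  intro candi _
  unfold Spec_CheckMinimality CheckMinimality CheckMinimality_alt
  simp only
  apply PySem.List.foldl_congr_mem
  intro acc i _
  rw [pvGuard_eq]
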